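-- pv_equiv track=rewrite | github.com/the-omega-institute/automath | theory/2026_golden_ratio_driven_scan_projection_generation_recursive_emergence/scripts/equational_theory/stable_arithmetic_facts.py | anti_pairs_bitset
-- ===== SOURCE A (Python) =====
-- def anti_pairs_bitset(satisfied: list[int], refuted: list[int], equation_count: int) -> int:
--     refuted_mask = 0
--     for consequent in refuted:
--         refuted_mask |= 1 << (consequent - 1)
--     bits = 0
--     for antecedent in satisfied:
--         bits |= refuted_mask << ((antecedent - 1) * equation_count)
--     return bits
-- ===== SOURCE B (Python) =====
-- def anti_pairs_bitset(satisfied: list[int], refuted: list[int], equation_count: int) -> int: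
--     bits = 0
--     for antecedent in satisfied:
--         base = (antecedent - 1) * equation_count
--         for consequent in refuted:
--             bits |= 1 << (base + (consequent - 1))
--     return bits
-- ===== Notes on version B (the rewrite author's own statement) =====
-- stated objective: alternative
-- what changed: Replaces the two-phase scheme (precompute a refuted_mask once, then OR a shifted copy of the whole block per antecedent) with a single nested loop that sets one bit per (antecedent, consequent) pair directly.
import Mathlib
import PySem

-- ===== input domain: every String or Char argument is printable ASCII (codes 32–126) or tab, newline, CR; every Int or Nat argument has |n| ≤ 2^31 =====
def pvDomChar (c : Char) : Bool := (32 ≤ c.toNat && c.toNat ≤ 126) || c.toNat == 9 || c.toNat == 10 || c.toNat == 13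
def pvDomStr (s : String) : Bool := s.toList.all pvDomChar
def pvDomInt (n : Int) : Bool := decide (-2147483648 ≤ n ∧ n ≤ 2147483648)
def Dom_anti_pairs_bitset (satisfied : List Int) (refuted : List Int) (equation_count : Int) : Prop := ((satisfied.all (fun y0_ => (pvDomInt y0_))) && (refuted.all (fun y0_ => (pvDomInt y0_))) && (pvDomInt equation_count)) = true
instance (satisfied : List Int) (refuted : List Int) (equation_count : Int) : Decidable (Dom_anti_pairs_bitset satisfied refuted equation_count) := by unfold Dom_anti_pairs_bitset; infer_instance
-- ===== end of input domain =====

-- B replaces A's two-phase scheme (precompute one refuted_mask, OR a shifted copy per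
-- antecedent) with a single nested loop setting one bit per (antecedent, consequent) pair.

-- ===== PORT A =====
-- Python `x | y` is PySem.Int.bor; Python `x << k` (k ≥ 0, guaranteed by Pre_) is the
-- core Nat-count shift `x <<< k.toNat`, written via pvShl to pin the Int-by-Nat instance.
def pvShl (x : Int) (n : Nat) : Int := x <<< n
def anti_pairs_bitset (satisfied : List Int) (refuted : List Int) (equation_count : Int) : Int :=
  let refuted_mask : Int :=
    refuted.foldl (fun m c => PySem.Int.bor m (pvShl 1 (c - 1).toNat)) 0
  satisfied.foldl
    (fun bits a => PySem.Int.bor bits (pvShl refuted_mask ((a - 1) * equation_count).toNat)) 0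

-- ===== PORT B =====
def anti_pairs_bitset_alt (satisfied : List Int) (refuted : List Int) (equation_count : Int) : Int :=
  satisfied.foldl
    (fun bits a =>
      let base := (a - 1) * equation_count
      refuted.foldl (fun bits c => PySem.Int.bor bits (pvShl 1 (base + (c - 1)).toNat)) bits)
    0

-- ===== PRECONDITION & SPEC =====
-- Pre_ excludes exactly the inputs on which Python A raises ValueError (a negative shift
-- count: some consequent ≤ 0, or some antecedent with (antecedent-1)*equation_count < 0).
def Pre_anti_pairs_bitset (satisfied : List Int) (refuted : List Int) (equation_count : Int) : Prop :=
  (∀ c ∈ refuted, 1 ≤ c) ∧ (∀ a ∈ satisfied, 0 ≤ (a - 1) * equation_count)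

instance (satisfied : List Int) (refuted : List Int) (equation_count : Int) : Decidable (Pre_anti_pairs_bitset satisfied refuted equation_count) := by unfold Pre_anti_pairs_bitset; infer_instance

def pvWitness_anti_pairs_bitset : List Int × List Int × Int := ([1, 3], [2, 1], 4)

def Spec_anti_pairs_bitset (satisfied : List Int) (refuted : List Int) (equation_count : Int) (out : Int) : Prop := out = anti_pairs_bitset_alt satisfied refuted equation_count
instance (satisfied : List Int) (refuted : List Int) (equation_count : Int) (out : Int) : Decidable (Spec_anti_pairs_bitset satisfied refuted equation_count out) := by unfold Spec_anti_pairs_bitset; infer_instance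

-- ===== CLAIM (what is proved, stated in full; the proofs are below) =====
def Claim_equal_anti_pairs_bitset : Prop := ∀ (satisfied : List Int) (refuted : List Int) (equation_count : Int), Dom_anti_pairs_bitset satisfied refuted equation_count → Pre_anti_pairs_bitset satisfied refuted equation_count → Spec_anti_pairs_bitset satisfied refuted equation_count (anti_pairs_bitset satisfied refuted equation_count)

-- ===== LEMMAS AND PROOFS =====

-- (↑m : Int) <<< k casts through ℕ
theorem pv_cast_shl (m k : Nat) : pvShl (m : Int) k = ((m <<< k : Nat) : Int) := by
  simp [pvShl]

-- one OR-step of a fold casts through ℕ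
theorem pv_step (b m n : Nat) :
    PySem.Int.bor (b : Int) (pvShl (m : Int) n) = ((b ||| m <<< n : Nat) : Int) := by
  rw [pv_cast_shl, PySem.Int.bor_natCast]

theorem pv_step1 (b n : Nat) :
    PySem.Int.bor (b : Int) (pvShl 1 n) = ((b ||| 1 <<< n : Nat) : Int) := by
  have := pv_step b 1 n; simpa using this

-- (1 <<< m) <<< k = 1 <<< (m + k) on ℕ
theorem pv_shl_shl (m k : Nat) : ((1 <<< m : Nat) <<< k) = (1 : Nat) <<< (m + k) := by
  simp [Nat.shiftLeft_eq, Nat.pow_add]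

-- the Nat-level mask build
def pvMaskN (r : List Int) : Nat :=
  r.foldl (fun m c => m ||| (1 : Nat) <<< (c - 1).toNat) 0

theorem pvMaskN_cast (r : List Int) (b : Nat) :
    r.foldl (fun m c => PySem.Int.bor m (pvShl 1 (c - 1).toNat)) (b : Int)
      = ((r.foldl (fun m c => m ||| (1 : Nat) <<< (c - 1).toNat) b : Nat) : Int) := by
  induction r generalizing b with
  | nil => rfl
  | cons c r ih =>
      simp only [List.foldl_cons]
      rw [pv_step1]
      exact ih _

-- pull the accumulator out of an OR-fold (ℕ)
theorem pv_pull (g : Int → Nat) (r : List Int) (b : Nat) :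
    r.foldl (fun m c => m ||| g c) b = b ||| r.foldl (fun m c => m ||| g c) 0 := by
  induction r generalizing b with
  | nil => simp
  | cons c r ih =>
      simp only [List.foldl_cons]
      rw [ih (b ||| g c), ih (0 ||| g c), Nat.zero_or, Nat.or_assoc]

-- shifting the whole mask = OR-ing the individually shifted bits into the accumulator
theorem pv_inner (r : List Int) (k : Int) (hk : 0 ≤ k) (hr : ∀ c ∈ r, 1 ≤ c) (b : Nat) :
    b ||| (pvMaskN r <<< k.toNat)
      = r.foldl (fun m c => m ||| (1 : Nat) <<< (k + (c - 1)).toNat) b := by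
  induction r generalizing b with
  | nil => simp [pvMaskN]
  | cons c r ih =>
      have hc : 1 ≤ c := hr c (by simp)
      have hmask : pvMaskN (c :: r) = (1 : Nat) <<< (c - 1).toNat ||| pvMaskN r := by
        simp only [pvMaskN, List.foldl_cons, Nat.zero_or]
        rw [pv_pull (fun c => (1 : Nat) <<< (c - 1).toNat)]
      have he : (k + (c - 1)).toNat = (c - 1).toNat + k.toNat := by omega
      simp only [List.foldl_cons, hmask, Nat.shiftLeft_or_distrib, pv_shl_shl]
      rw [← ih (fun x hx => hr x (by simp [hx])) (b ||| 1 <<< (k + (c - 1)).toNat), he,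
        Nat.or_assoc]

-- Nat-level equality of the two outer loops
theorem pv_outer (s r : List Int) (eqc : Int) (hr : ∀ c ∈ r, 1 ≤ c)
    (hs : ∀ a ∈ s, 0 ≤ (a - 1) * eqc) (b : Nat) :
    s.foldl (fun bits a => bits ||| pvMaskN r <<< ((a - 1) * eqc).toNat) b
      = s.foldl
          (fun bits a =>
            r.foldl (fun m c => m ||| (1 : Nat) <<< ((a - 1) * eqc + (c - 1)).toNat) bits) b := by
  induction s generalizing b with
  | nil => rfl
  | cons a s ih =>
      simp only [List.foldl_cons]
      rw [pv_inner r ((a - 1) * eqc) (hs a (by simp)) hr b]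
      exact ih (fun x hx => hs x (by simp [hx])) _
-- cast B's nested fold through ℕ
theorem pv_alt_cast (s r : List Int) (eqc : Int) (b : Nat) :
    s.foldl
        (fun bits a =>
          let base := (a - 1) * eqc
          r.foldl (fun bits c => PySem.Int.bor bits (pvShl 1 (base + (c - 1)).toNat)) bits)
        (b : Int)
      = ((s.foldl
            (fun bits a =>
              r.foldl (fun m c => m ||| (1 : Nat) <<< ((a - 1) * eqc + (c - 1)).toNat) bits) b
          : Nat) : Int) := by
  induction s generalizing b with
  | nil => rfl
  | cons a s ih =>
      simp only [List.foldl_cons]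
      have hin : ∀ (rr : List Int) (bb : Nat),
          rr.foldl
              (fun bits c => PySem.Int.bor bits (pvShl 1 ((a - 1) * eqc + (c - 1)).toNat))
              (bb : Int)
            = ((rr.foldl (fun m c => m ||| (1 : Nat) <<< ((a - 1) * eqc + (c - 1)).toNat) bb
                : Nat) : Int) := by
        intro rr
        induction rr with
        | nil => intro bb; rfl
        | cons c rr ihr =>
            intro bb
            simp only [List.foldl_cons]
            rw [pv_step1]
            exact ihr _
      rw [hin r b]
      exact ih _

-- cast A's outer fold through ℕ
theorem pv_a_cast (s : List Int) (eqc : Int) (mN : Nat) (b : Nat) :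
    s.foldl (fun bits a => PySem.Int.bor bits (pvShl (mN : Int) ((a - 1) * eqc).toNat)) (b : Int)
      = ((s.foldl (fun bits a => bits ||| mN <<< ((a - 1) * eqc).toNat) b : Nat) : Int) := by
  induction s generalizing b with
  | nil => rfl
  | cons a s ih =>
      simp only [List.foldl_cons]
      rw [pv_step]
      exact ih _

-- ===== VERDICT (by name: the statement is the Claim_ definition above) =====
theorem anti_pairs_bitset_spec : Claim_equal_anti_pairs_bitset := by
  intro s r eqc _ hpre
  obtain ⟨hr, hs⟩ := hpre
  unfold Spec_anti_pairs_bitset anti_pairs_bitset anti_pairs_bitset_alt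
  have hmask := pvMaskN_cast r 0
  simp only [Nat.cast_zero] at hmask
  rw [hmask]
  have ha := pv_a_cast s eqc (pvMaskN r) 0
  simp only [Nat.cast_zero] at ha
  rw [show (r.foldl (fun m c => m ||| (1 : Nat) <<< (c - 1).toNat) 0) = pvMaskN r from rfl, ha]
  have hb := pv_alt_cast s r eqc 0
  simp only [Nat.cast_zero] at hb
  rw [hb, pv_outer s r eqc hr hs 0]
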